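-- pv_equiv track=rewrite | github.com/ssoto/adventofcode-2017 | day10/puzzle.py | sublist_reverse
-- ===== SOURCE A (Python) =====
-- def sublist_reverse(start_rev, size, orig_lst):
--     lst = orig_lst.copy()
--     reversed = [
--         lst[i % len(orig_lst)]
--         for i in range(start_rev, start_rev+size)
--     ]
--     reversed.reverse()
--
--     for i, element in enumerate(reversed, start_rev):
--         lst[i % len(orig_lst)] = element
--
--     return lst
-- ===== SOURCE B (Python) =====
-- def sublist_reverse(start_rev, size, orig_lst):
--     n = len(orig_lst)
--     return [
--         orig_lst[(start_rev + (start_rev + size - 1 - j) % n) % n]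
--         if (j - start_rev) % n < size else orig_lst[j]
--         for j in range(n)
--     ]
-- ===== Notes on version B (the rewrite author's own statement) =====
-- stated objective: alternative
-- what changed: B abandons A's mutate-a-copy write-back loop entirely: it builds the result as a single comprehension over output positions j, computing each final element by the closed form orig[(s + (s+size-1-j) % n) % n] when j lies in the wrapped window ((j-s) % n < size) and orig[j] otherwise, so cost is O(n) independent of size instead of A's O(n+size).
import Mathlib
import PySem

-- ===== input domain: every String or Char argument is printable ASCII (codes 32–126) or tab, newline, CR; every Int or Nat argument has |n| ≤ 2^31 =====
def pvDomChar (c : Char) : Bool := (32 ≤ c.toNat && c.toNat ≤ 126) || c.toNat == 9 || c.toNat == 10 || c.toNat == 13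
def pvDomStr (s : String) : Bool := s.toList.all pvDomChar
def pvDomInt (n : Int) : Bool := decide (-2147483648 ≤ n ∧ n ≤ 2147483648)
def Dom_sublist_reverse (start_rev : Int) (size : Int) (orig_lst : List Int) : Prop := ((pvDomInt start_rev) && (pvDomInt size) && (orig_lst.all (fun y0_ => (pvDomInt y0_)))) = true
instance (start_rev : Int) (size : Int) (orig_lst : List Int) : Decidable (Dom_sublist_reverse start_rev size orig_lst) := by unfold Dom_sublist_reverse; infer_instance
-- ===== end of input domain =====

-- B replaces A's mutate-a-copy write-back loop by a per-position closed form (a single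
-- comprehension over output indices); return values proved equal on Pre_ (where A does not raise).

-- ===== PORT A =====
-- Literal port of A: copy, build the wrapped segment, reverse it, write it back via
-- enumerate(reversed, start_rev). The indices i % n lie in [0, n) when n > 0 (Pre_),
-- so pyGetD/pySetD are exact there.
def sublist_reverse (start_rev : Int) (size : Int) (orig_lst : List Int) : List Int :=
  let lst := orig_lst
  let n : Int := orig_lst.length
  let revd := ((PySem.List.pyRange start_rev (start_rev + size) 1).map
      (fun i => PySem.List.pyGetD lst (PySem.Int.mod i n) 0)).reverse
  -- enumerate(revd, start_rev): written via zipIdx (tail-recursive); equal to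
  -- PySem.List.enumerate revd start_rev by PySem.List.enumerate_eq_zipIdx_map
  (revd.zipIdx.map (fun p => (start_rev + (p.2 : Int), p.1))).foldl
    (fun acc p => PySem.List.pySetD acc (PySem.Int.mod p.1 n) p.2) lst

-- ===== PORT B =====
-- Literal port of B: one comprehension over range(n); position j gets the mirrored element
-- orig[(s + (s+size-1-j) % n) % n] if j is touched by the wrapped window, else orig[j].
def sublist_reverse_alt (start_rev : Int) (size : Int) (orig_lst : List Int) : List Int :=
  let n : Int := orig_lst.length
  (PySem.List.pyRange 0 n 1).map (fun j =>
    if PySem.Int.mod (j - start_rev) n < size then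
      PySem.List.pyGetD orig_lst
        (PySem.Int.mod (start_rev + PySem.Int.mod (start_rev + size - 1 - j) n) n) 0
    else PySem.List.pyGetD orig_lst j 0)

-- ===== PRECONDITION & SPEC =====
-- Pre_ excludes exactly the inputs where A raises ZeroDivisionError: an empty list with
-- size > 0 (the % len(orig_lst) divides by zero).
def Pre_sublist_reverse (start_rev : Int) (size : Int) (orig_lst : List Int) : Prop :=
  orig_lst = [] → size ≤ 0
instance (start_rev : Int) (size : Int) (orig_lst : List Int) : Decidable (Pre_sublist_reverse start_rev size orig_lst) := by unfold Pre_sublist_reverse; infer_instance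

def pvWitness_sublist_reverse : Int × Int × List Int := (1, 3, [10, 20, 30, 40])

def Spec_sublist_reverse (start_rev : Int) (size : Int) (orig_lst : List Int) (out : List Int) : Prop := out = sublist_reverse_alt start_rev size orig_lst
instance (start_rev : Int) (size : Int) (orig_lst : List Int) (out : List Int) : Decidable (Spec_sublist_reverse start_rev size orig_lst out) := by unfold Spec_sublist_reverse; infer_instance

-- ===== CLAIM (what is proved, stated in full; the proofs are below) =====
def Claim_equal_sublist_reverse : Prop := ∀ (start_rev : Int) (size : Int) (orig_lst : List Int), Dom_sublist_reverse start_rev size orig_lst → Pre_sublist_reverse start_rev size orig_lst → Spec_sublist_reverse start_rev size orig_lst (sublist_reverse start_rev size orig_lst)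
-- ===== LEMMAS AND PROOFS =====

-- A's write-back loop, abstracted: after m steps the copy has received, for k < m,
-- the value orig[(s+size-1-k) % n] at index (s+k) % n.
def pvMirror (s size : Int) (orig : List Int) (m : Nat) : List Int :=
  (List.range m).foldl
    (fun acc (k : Nat) => PySem.List.pySetD acc (PySem.Int.mod (s + (k : Int)) (orig.length : Int))
      (PySem.List.pyGetD orig (PySem.Int.mod (s + size - 1 - (k : Int)) (orig.length : Int)) 0))
    orig

theorem pvMirror_succ (s size : Int) (orig : List Int) (m : Nat) :
    pvMirror s size orig (m + 1)
      = PySem.List.pySetD (pvMirror s size orig m)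
          (PySem.Int.mod (s + (m : Int)) (orig.length : Int))
          (PySem.List.pyGetD orig (PySem.Int.mod (s + size - 1 - (m : Int)) (orig.length : Int)) 0) := by
  unfold pvMirror
  rw [List.range_succ, List.foldl_append, List.foldl_cons, List.foldl_nil]

theorem pvMirror_length (s size : Int) (orig : List Int) (m : Nat) :
    (pvMirror s size orig m).length = orig.length := by
  induction m with
  | zero => simp [pvMirror]
  | succ m ih => rw [pvMirror_succ, PySem.List.length_pySetD, ih]

-- reverse of a map over List.range, as a map over List.range
theorem pv_reverse_map_range {α : Type} (g : Nat → α) (m : Nat) :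
    ((List.range m).map g).reverse = (List.range m).map (fun k => g (m - 1 - k)) := by
  apply List.ext_getElem
  · simp
  · intro k h1 h2
    simp at h1 h2
    simp [List.getElem_reverse]

-- enumerate of a map over List.range, as a map over List.range
theorem pv_enumerate_map_range {α : Type} (g : Nat → α) (m : Nat) (s : Int) :
    PySem.List.enumerate ((List.range m).map g) s
      = (List.range m).map (fun (k : Nat) => ((s + k : Int), g k)) := by
  apply List.ext_getElem
  · simp [PySem.List.length_enumerate]
  · intro k h1 h2
    rw [PySem.List.getElem_enumerate]
    simp at h1 h2 ⊢

-- A's port equals the abstracted loop.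
theorem pv_A_eq_mirror (s size : Int) (orig : List Int) :
    sublist_reverse s size orig = pvMirror s size orig size.toNat := by
  unfold sublist_reverse pvMirror
  dsimp only
  rw [← PySem.List.enumerate_eq_zipIdx_map]
  by_cases hsz : size ≤ 0
  · rw [PySem.List.pyRange_one_eq_nil (by omega)]
    have : size.toNat = 0 := by omega
    simp [this, PySem.List.enumerate_nil]
  · have hm2 : (s + size - s).toNat = size.toNat := by omega
    rw [PySem.List.pyRange_one, hm2]
    rw [List.map_map, pv_reverse_map_range, pv_enumerate_map_range]
    rw [List.foldl_map]
    apply PySem.List.foldl_congr_mem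
    intro acc k hk
    simp only [List.mem_range] at hk
    simp only [Function.comp]
    have h2 : s + ((size.toNat - 1 - k : Nat) : Int) = s + size - 1 - (k : Int) := by omega
    rw [h2]

-- arithmetic facts about % with a positive variable modulus
theorem pv_mod_sub (n s m j : Int) (hj : j = (s + m) % n) : (j - s) % n = m % n := by
  subst hj
  calc ((s + m) % n - s) % n = ((s + m) % n % n - s % n) % n := by rw [← Int.sub_emod]
    _ = ((s + m) % n - s % n) % n := by rw [Int.emod_emod_of_dvd _ dvd_rfl]
    _ = ((s + m) - s) % n := by rw [← Int.sub_emod]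
    _ = m % n := by ring_nf

theorem pv_mod_val (n s size m j : Int) (hj : j = (s + m) % n) :
    (s + size - 1 - m) % n = (s + (s + size - 1 - j) % n) % n := by
  subst hj
  have e1 : s + size - 1 - (s + m) % n = (s + size - 1) - (s + m) % n := by ring
  have e2 : ((s + size - 1) - (s + m) % n) % n = ((s + size - 1) - (s + m)) % n := by
    conv_lhs => rw [Int.sub_emod, Int.emod_emod_of_dvd _ dvd_rfl]
    rw [← Int.sub_emod]
  have e3 : (s + ((s + size - 1) - (s + m)) % n) % n = (s + ((s + size - 1) - (s + m))) % n := by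
    conv_lhs => rw [Int.add_emod, Int.emod_emod_of_dvd _ dvd_rfl]
    rw [← Int.add_emod]
  have e4 : (s + (s + size - 1 - (s + m) % n) % n) % n
      = (s + ((s + size - 1) - (s + m))) % n := by
    rw [e1, e2, e3]
  rw [e4]
  have : s + ((s + size - 1) - (s + m)) = s + size - 1 - m := by ring
  rw [this]

theorem pv_mod_le (n m : Int) (hn : 0 < n) (hm : 0 ≤ m) : m % n ≤ m := by
  rcases lt_or_ge m n with h | h
  · rw [Int.emod_eq_of_lt hm h]
  · exact le_trans (le_of_lt (Int.emod_lt_of_pos m hn)) h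

theorem pv_mod_ne (n s m j : Int) (h0 : 0 ≤ j) (h1 : j < n)
    (hne : j ≠ (s + m) % n) : (j - s) % n ≠ m := by
  intro h
  apply hne
  have h2 : m % n = m := by
    rw [← h]; exact Int.emod_emod_of_dvd _ dvd_rfl
  calc j = j % n := (Int.emod_eq_of_lt h0 h1).symm
    _ = (s + (j - s)) % n := by rw [show s + (j - s) = j from by ring]
    _ = (s % n + (j - s) % n) % n := Int.add_emod _ _ _
    _ = (s % n + m % n) % n := by rw [h, h2]
    _ = (s + m) % n := (Int.add_emod s m n).symm

-- element-wise characterisation of the write-back loop (n > 0)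
theorem pvMirror_getD (s size : Int) (orig : List Int) (m : Nat) (j : Nat)
    (horig : orig ≠ []) (hj : j < orig.length) :
    (pvMirror s size orig m).getD j 0
      = if PySem.Int.mod ((j : Int) - s) (orig.length : Int) < (m : Int) then
          PySem.List.pyGetD orig
            (PySem.Int.mod (s + PySem.Int.mod (s + size - 1 - (j : Int)) (orig.length : Int))
              (orig.length : Int)) 0
        else orig[j] := by
  have hn : (0 : Int) < (orig.length : Int) := by
    have := List.length_pos_iff.mpr horig; exact_mod_cast this
  have hmod : ∀ a : Int, PySem.Int.mod a (orig.length : Int) = a % (orig.length : Int) :=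
    fun a => PySem.Int.mod_eq_emod_of_pos hn
  induction m with
  | zero =>
    rw [if_neg]
    · simp only [pvMirror, List.range_zero, List.foldl_nil]
      exact List.getD_eq_getElem orig 0 hj
    · rw [hmod]
      have h0 := Int.emod_nonneg ((j : Int) - s) (show (orig.length : Int) ≠ 0 by omega)
      simp only [Nat.cast_zero]
      omega
  | succ m ih =>
    have hlen : (pvMirror s size orig m).length = orig.length := pvMirror_length s size orig m
    have hi0 : 0 ≤ PySem.Int.mod (s + (m : Int)) (orig.length : Int) := by
      rw [hmod]; exact Int.emod_nonneg _ (show (orig.length : Int) ≠ 0 by omega)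
    have hilt : (PySem.Int.mod (s + (m : Int)) (orig.length : Int)).toNat < orig.length := by
      rw [hmod]
      have := Int.emod_lt_of_pos (s + (m : Int)) hn
      omega
    rw [pvMirror_succ, PySem.List.pySetD_of_nonneg _ _ hi0]
    have hjset : j < ((pvMirror s size orig m).set
        (PySem.Int.mod (s + (m : Int)) (orig.length : Int)).toNat
        (PySem.List.pyGetD orig (PySem.Int.mod (s + size - 1 - (m : Int)) (orig.length : Int)) 0)).length := by
      rw [List.length_set, hlen]; exact hj
    rw [List.getD_eq_getElem _ 0 hjset, List.getElem_set]
    by_cases hij : (PySem.Int.mod (s + (m : Int)) (orig.length : Int)).toNat = j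
    · rw [if_pos hij]
      have hjint : (j : Int) = (s + (m : Int)) % (orig.length : Int) := by
        rw [← hmod]; omega
      rw [if_pos]
      · congr 1
        rw [hmod, hmod, hmod]
        exact pv_mod_val (orig.length : Int) s size (m : Int) (j : Int) hjint
      · rw [hmod, pv_mod_sub (orig.length : Int) s (m : Int) (j : Int) hjint]
        have := pv_mod_le (orig.length : Int) (m : Int) hn (by omega)
        push_cast
        omega
    · rw [if_neg hij]
      have hback : (pvMirror s size orig m)[j]'(by rw [hlen]; exact hj)
          = (pvMirror s size orig m).getD j 0 :=
        (List.getD_eq_getElem _ 0 (by rw [hlen]; exact hj)).symm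
      rw [hback, ih]
      have hne : ((j : Int) - s) % (orig.length : Int) ≠ (m : Int) := by
        apply pv_mod_ne _ _ _ _ (by omega) (by exact_mod_cast hj)
        rw [← hmod]
        omega
      by_cases hc : PySem.Int.mod ((j : Int) - s) (orig.length : Int) < (m : Int)
      · rw [if_pos hc, if_pos (by push_cast; omega)]
      · rw [if_neg hc, if_neg]
        rw [hmod] at hc ⊢
        push_cast
        omega

-- ===== VERDICT (by name: the statement is the Claim_ definition above) =====
theorem sublist_reverse_spec : Claim_equal_sublist_reverse := by
  intro s size orig _hdom hpre
  unfold Spec_sublist_reverse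
  by_cases horig : orig = []
  · subst horig
    have hsz : size ≤ 0 := hpre rfl
    unfold sublist_reverse sublist_reverse_alt
    simp [PySem.List.pyRange_one_eq_nil (show s + size ≤ s by omega),
      PySem.List.pyRange_one_eq_nil (show (0 : Int) ≤ 0 by omega)]
  · rw [pv_A_eq_mirror]
    unfold sublist_reverse_alt
    dsimp only
    have hn : (0 : Int) < (orig.length : Int) := by
      have := List.length_pos_iff.mpr horig; exact_mod_cast this
    apply List.ext_getElem
    · rw [pvMirror_length]
      simp [PySem.List.length_pyRange_one]
    · intro j h1 h2
      rw [pvMirror_length] at h1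
      rw [List.getElem_map, PySem.List.getElem_pyRange_one]
      have hfwd : (pvMirror s size orig size.toNat)[j]'(by rw [pvMirror_length]; exact h1)
          = (pvMirror s size orig size.toNat).getD j 0 :=
        (List.getD_eq_getElem _ 0 (by rw [pvMirror_length]; exact h1)).symm
      rw [hfwd, pvMirror_getD s size orig size.toNat j horig h1]
      have hz : (0 : Int) + (j : Int) = (j : Int) := by ring
      rw [hz]
      by_cases hsz : size ≤ 0
      · have hge := Int.emod_nonneg ((j : Int) - s) (show (orig.length : Int) ≠ 0 by omega)
        have hmn : ¬ PySem.Int.mod ((j : Int) - s) (orig.length : Int) < size := by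
          rw [PySem.Int.mod_eq_emod_of_pos hn]
          omega
        have hmn' : ¬ PySem.Int.mod ((j : Int) - s) (orig.length : Int) < ((size.toNat : Nat) : Int) := by
          rw [PySem.Int.mod_eq_emod_of_pos hn]
          omega
        rw [if_neg hmn, if_neg hmn']
        rw [PySem.List.pyGetD_natCast]
        exact (List.getD_eq_getElem orig 0 h1).symm
      · have hcast : ((size.toNat : Nat) : Int) = size := by omega
        rw [hcast]
        by_cases hc : PySem.Int.mod ((j : Int) - s) (orig.length : Int) < size
        · rw [if_pos hc, if_pos hc]
        · rw [if_neg hc, if_neg hc]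
          rw [PySem.List.pyGetD_natCast]
          exact (List.getD_eq_getElem orig 0 h1).symm
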